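-- pv_equiv track=rewrite | github.com/paiml/depyler | examples/hard_postfix_eval.py | is_digit_string
-- ===== SOURCE A (Python) =====
-- def is_digit_string(s: str) -> int:
--     """Return 1 if string represents an integer (possibly negative), else 0."""
--     length: int = len(s)
--     if length == 0:
--         return 0
--     start: int = 0
--     if s[0] == "-":
--         if length == 1:
--             return 0
--         start = 1
--     idx: int = start
--     while idx < length:
--         ch: str = s[idx]
--         if ch < "0" or ch > "9":
--             return 0
--         idx = idx + 1
--     return 1
-- ===== SOURCE B (Python) =====
-- def is_digit_string(s: str) -> int:
--     """DFA for the regex -?[0-9]+ : states 0=start, 1=after '-', 2=in digits, 3=reject.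
--
--     One fold over the characters; accept iff the final state is 2.
--     """
--     state = 0
--     for ch in s:
--         d = "0" <= ch <= "9"
--         if state == 0:
--             state = 2 if d else (1 if ch == "-" else 3)
--         elif state == 1 or state == 2:
--             state = 2 if d else 3
--         else:
--             state = 3
--     return 1 if state == 2 else 0
-- ===== Notes on version B (the rewrite author's own statement) =====
-- stated objective: alternative
-- what changed: Replaced the guard-branches-plus-index-scan with an explicit 4-state finite automaton for the pattern -?[0-9]+, run as a single fold over the characters and accepting iff the final state is the digit state.
import Mathlib
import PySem

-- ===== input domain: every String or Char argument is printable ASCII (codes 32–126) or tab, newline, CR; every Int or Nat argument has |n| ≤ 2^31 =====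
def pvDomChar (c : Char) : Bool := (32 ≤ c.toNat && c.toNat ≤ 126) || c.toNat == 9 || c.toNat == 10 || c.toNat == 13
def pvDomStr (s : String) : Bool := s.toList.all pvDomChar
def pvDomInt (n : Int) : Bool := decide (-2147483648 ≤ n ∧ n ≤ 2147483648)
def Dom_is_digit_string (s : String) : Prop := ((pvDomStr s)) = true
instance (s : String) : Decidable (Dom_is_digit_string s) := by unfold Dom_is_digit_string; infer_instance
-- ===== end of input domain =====

-- B replaces A's guard branches + index scan by an explicit 4-state DFA for -?[0-9]+ run as one fold (alternative, same cost).

-- ===== PORT A =====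
-- while idx < length: check s[idx]; return 0 on non-digit, else 1 at the end
def isDigitLoopA (cs : List Char) (length : Nat) (idx : Nat) : Int :=
  if idx < length then
    let ch := cs[idx]?.getD ' '
    if ch < '0' || '9' < ch then 0
    else isDigitLoopA cs length (idx + 1)
  else 1
termination_by length - idx

def is_digit_string (s : String) : Int :=
  let cs := s.toList
  let length := cs.length
  if length = 0 then 0
  else
    if cs[0]?.getD ' ' = '-' then
      (if length = 1 then 0 else isDigitLoopA cs length 1)
    else isDigitLoopA cs length 0

-- ===== PORT B =====
-- DFA states: 0 = start, 1 = after '-', 2 = in digits, 3 = reject; accept iff 2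
def dfaStep (st : Nat) (ch : Char) : Nat :=
  let d := '0' ≤ ch && ch ≤ '9'
  if st = 0 then (if d then 2 else if ch = '-' then 1 else 3)
  else if st = 1 ∨ st = 2 then (if d then 2 else 3)
  else 3

def is_digit_string_alt (s : String) : Int :=
  let st := s.toList.foldl dfaStep 0
  if st = 2 then 1 else 0

-- ===== PRECONDITION & SPEC =====
def Spec_is_digit_string (s : String) (out : Int) : Prop := out = is_digit_string_alt s
instance (s : String) (out : Int) : Decidable (Spec_is_digit_string s out) := by unfold Spec_is_digit_string; infer_instance

-- ===== CLAIM (what is proved, stated in full; the proofs are below) =====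
def Claim_equal_is_digit_string : Prop := ∀ (s : String), Dom_is_digit_string s → Spec_is_digit_string s (is_digit_string s)

-- ===== LEMMAS AND PROOFS =====

theorem foldl_dfa_reject (l : List Char) : l.foldl dfaStep 3 = 3 := by
  induction l with
  | nil => rfl
  | cons c tl ih => simpa [dfaStep] using ih

theorem foldl_dfa_two (l : List Char) :
    l.foldl dfaStep 2 = (if l.all (fun c => '0' ≤ c && c ≤ '9') then 2 else 3) := by
  induction l with
  | nil => rfl
  | cons c tl ih =>
    by_cases hd : ('0' ≤ c && c ≤ '9') = true
    · simp [dfaStep, hd, ih]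
    · simp [dfaStep, hd, foldl_dfa_reject]

theorem foldl_dfa_one (l : List Char) :
    l.foldl dfaStep 1 =
      (if l = [] then 1 else if l.all (fun c => '0' ≤ c && c ≤ '9') then 2 else 3) := by
  cases l with
  | nil => rfl
  | cons c tl =>
    by_cases hd : ('0' ≤ c && c ≤ '9') = true
    · simp [dfaStep, hd, foldl_dfa_two tl]
    · simp [dfaStep, hd, foldl_dfa_reject]

theorem isDigitLoopA_eq (cs : List Char) : ∀ (n idx : Nat), cs.length - idx = n →
    isDigitLoopA cs cs.length idx =
      (if (cs.drop idx).all (fun c => '0' ≤ c && c ≤ '9') then 1 else 0) := by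
  intro n
  induction n with
  | zero =>
    intro idx hn
    have h : ¬ idx < cs.length := by omega
    rw [isDigitLoopA]
    simp [h, List.drop_eq_nil_of_le (by omega : cs.length ≤ idx)]
  | succ n ih =>
    intro idx hn
    have hlt : idx < cs.length := by omega
    rw [isDigitLoopA]
    have hget : cs[idx]?.getD ' ' = cs[idx] := by
      simp [List.getElem?_eq_getElem hlt]
    have hdrop : cs.drop idx = cs[idx] :: cs.drop (idx + 1) :=
      List.drop_eq_getElem_cons hlt
    simp only [hlt, if_pos, hget, hdrop, List.all_cons]
    by_cases hd : cs[idx] < '0' ∨ '9' < cs[idx]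
    · have : ¬ ('0' ≤ cs[idx] && cs[idx] ≤ '9') = true := by
        rcases hd with hd | hd <;> simp_all [Char.le_def, Char.lt_def]
      simp_all
    · rw [not_or] at hd
      have hb : ('0' ≤ cs[idx] && cs[idx] ≤ '9') = true := by
        simp [Char.le_def] at hd ⊢
        exact hd
      have hdlt : (cs[idx] < '0' || '9' < cs[idx]) = false := by
        simp [hd.1, hd.2]
      simp only [hdlt, Bool.false_eq_true, if_neg, not_false_eq_true, hb, Bool.true_and]
      exact ih (idx + 1) (by omega)

-- ===== VERDICT (by name: the statement is the Claim_ definition above) =====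
theorem is_digit_string_spec : Claim_equal_is_digit_string := by
  intro s _
  show is_digit_string s = is_digit_string_alt s
  unfold is_digit_string is_digit_string_alt
  cases hcs : s.toList with
  | nil => simp
  | cons c rest =>
    by_cases hm : c = '-'
    · subst hm
      have hfirst : dfaStep 0 '-' = 1 := by decide
      cases rest with
      | nil => simp [List.foldl, hfirst]
      | cons d tl =>
        have hA := isDigitLoopA_eq s.toList (s.toList.length - 1) 1 rfl
        rw [hcs] at hA
        simp only [List.length_cons, List.drop_succ_cons, List.drop_zero] at hA
        have hB : List.foldl dfaStep (dfaStep 1 d) tl =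
            (if (d :: tl).all (fun c => '0' ≤ c && c ≤ '9') then 2 else 3) := by
          rw [← List.foldl_cons, foldl_dfa_one]; simp
        simp only [List.length_cons, List.foldl_cons, hfirst]
        simp [hA, hB]
        split_ifs <;> simp_all
    · have hA := isDigitLoopA_eq s.toList (s.toList.length - 0) 0 rfl
      rw [hcs] at hA
      simp only [List.drop_zero, List.length_cons] at hA
      by_cases hd : ('0' ≤ c && c ≤ '9') = true
      · have h0 : dfaStep 0 c = 2 := by simp [dfaStep, hd]
        simp only [List.length_cons, List.foldl_cons, h0, foldl_dfa_two]
        simp [hA, hm, hd]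
      · have h0 : dfaStep 0 c = 3 := by simp [dfaStep, hd, hm]
        simp only [List.length_cons, List.foldl_cons, h0, foldl_dfa_reject]
        simp [hA, hm, hd]
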